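-- pv_equiv track=rewrite | github.com/daniel-reich/turbo-robot | a6XHqehbttHnjE7bK_6.py | is_repdigit
-- ===== SOURCE A (Python) =====
-- def is_repdigit(num):
--     num = list(str(num))
--     lis = []
--     for i in range(len(num)):
--         if i >= len(num)-1:
--             break
--         elif num[i] == num[i+1]:
--             lis.append(True)
--         else: lis.append(False)
--     return False if False in lis else True
-- ===== SOURCE B (Python) =====
-- def is_repdigit(num):
--     return len(set(str(num))) <= 1
-- ===== Notes on version B (the rewrite author's own statement) =====
-- stated objective: simpler
-- what changed: Replaces A's index loop building a list of pairwise adjacent-equality booleans (then searching it for False) with a single distinct-character count: len(set(str(num))) <= 1.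
import Mathlib
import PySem

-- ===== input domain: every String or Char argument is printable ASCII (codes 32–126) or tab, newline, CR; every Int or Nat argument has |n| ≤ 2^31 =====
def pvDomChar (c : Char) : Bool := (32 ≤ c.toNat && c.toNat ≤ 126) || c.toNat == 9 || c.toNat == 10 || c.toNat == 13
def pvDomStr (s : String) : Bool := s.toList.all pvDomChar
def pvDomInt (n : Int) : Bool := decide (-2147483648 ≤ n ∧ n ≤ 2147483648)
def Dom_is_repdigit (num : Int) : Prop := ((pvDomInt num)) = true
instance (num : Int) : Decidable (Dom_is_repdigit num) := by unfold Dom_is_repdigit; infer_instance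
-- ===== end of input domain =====

-- B replaces A's index loop over pairwise adjacent-equality booleans by a distinct-character
-- count (len(set(str(num))) <= 1); simpler, same asymptotic cost.


-- ===== PORT A =====
-- the 'for i in range(len(num))' loop with its break / append branches, step for step
def isRepdigitLoopA (l : List Char) (i : Nat) (lis : List Bool) : List Bool :=
  if i < l.length then
    if (i : Int) ≥ (l.length : Int) - 1 then lis
    else isRepdigitLoopA l (i + 1) (lis ++ [l[i]?.getD ' ' == l[i + 1]?.getD ' '])
  else lis
termination_by l.length - i

def is_repdigit (num : Int) : Bool :=
  let numL := (PySem.Int.toStr num).toList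
  let lis := isRepdigitLoopA numL 0 []
  if lis.contains false then false else true

-- ===== PORT B =====
def is_repdigit_alt (num : Int) : Bool :=
  decide ((PySem.Set.ofList (PySem.Int.toStr num).toList).length ≤ 1)

-- ===== PRECONDITION & SPEC =====
def Spec_is_repdigit (num : Int) (out : Bool) : Prop := out = is_repdigit_alt num
instance (num : Int) (out : Bool) : Decidable (Spec_is_repdigit num out) := by unfold Spec_is_repdigit; infer_instance

-- ===== CLAIM (what is proved, stated in full; the proofs are below) =====
def Claim_equal_is_repdigit : Prop := ∀ (num : Int), Dom_is_repdigit num → Spec_is_repdigit num (is_repdigit num)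

-- ===== LEMMAS AND PROOFS =====

-- the loop accumulator is only ever appended to
theorem isRepdigitLoopA_acc_aux (l : List Char) :
    ∀ (n i : Nat) (lis : List Bool), l.length - i ≤ n →
      isRepdigitLoopA l i lis = lis ++ isRepdigitLoopA l i [] := by
  intro n
  induction n with
  | zero =>
      intro i lis h
      conv_lhs => rw [isRepdigitLoopA.eq_def]
      conv_rhs => rw [isRepdigitLoopA.eq_def]
      split_ifs with h1 h2
      · simp
      · exact absurd h1 (by omega)
      · simp
  | succ n ih =>
      intro i lis h
      conv_lhs => rw [isRepdigitLoopA.eq_def]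
      conv_rhs => rw [isRepdigitLoopA.eq_def]
      split_ifs with h1 h2
      · simp
      · rw [ih (i + 1) _ (by omega), ih (i + 1) (([] : List Bool) ++ _) (by omega)]
        simp
      · simp

theorem isRepdigitLoopA_acc (l : List Char) (i : Nat) (lis : List Bool) :
    isRepdigitLoopA l i lis = lis ++ isRepdigitLoopA l i [] :=
  isRepdigitLoopA_acc_aux l l.length i lis (by omega)

-- dropping the head of the list shifts the loop index by one
theorem isRepdigitLoopA_shift_aux (c : Char) (l : List Char) :
    ∀ (n i : Nat), l.length - i ≤ n →
      isRepdigitLoopA (c :: l) (i + 1) [] = isRepdigitLoopA l i [] := by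
  intro n
  induction n with
  | zero =>
      intro i h
      conv_lhs => rw [isRepdigitLoopA.eq_def]
      conv_rhs => rw [isRepdigitLoopA.eq_def]
      rw [if_neg (by simp only [List.length_cons]; omega), if_neg (by omega)]
  | succ n ih =>
      intro i h
      conv_lhs => rw [isRepdigitLoopA.eq_def]
      conv_rhs => rw [isRepdigitLoopA.eq_def]
      by_cases h1 : i < l.length
      · rw [if_pos (by simp only [List.length_cons]; omega), if_pos h1]
        by_cases h2 : (i : Int) ≥ (l.length : Int) - 1
        · rw [if_pos (by simp only [List.length_cons]; push_cast; omega),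
            if_pos h2]
        · rw [if_neg (by simp only [List.length_cons]; push_cast; omega),
            if_neg h2]
          rw [isRepdigitLoopA_acc (c :: l), isRepdigitLoopA_acc l, ih (i + 1) (by omega)]
          simp
      · rw [if_neg (by simp only [List.length_cons]; omega), if_neg h1]

theorem isRepdigitLoopA_cons_cons (c d : Char) (t : List Char) :
    isRepdigitLoopA (c :: d :: t) 0 [] = (c == d) :: isRepdigitLoopA (d :: t) 0 [] := by
  rw [isRepdigitLoopA]
  rw [if_pos (by simp), if_neg (by simp only [List.length_cons]; push_cast; omega)]
  rw [isRepdigitLoopA_acc, isRepdigitLoopA_shift_aux c (d :: t) (d :: t).length 0 (by omega)]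
  simp

-- A's loop result contains no False exactly when every element equals every other
theorem loopA_no_false_iff (l : List Char) :
    ((isRepdigitLoopA l 0 []).contains false = false) ↔ ∀ x ∈ l, ∀ y ∈ l, x = y := by
  induction l with
  | nil => simp [isRepdigitLoopA]
  | cons c t ih =>
      cases t with
      | nil => simp [isRepdigitLoopA]
      | cons d t' =>
          rw [isRepdigitLoopA_cons_cons]
          constructor
          · intro h x hx y hy
            simp only [List.contains_cons, Bool.or_eq_false_iff] at h
            obtain ⟨hcd, hrest⟩ := h
            have hcd' : c = d := by
              by_contra hne
              simp [beq_eq_false_iff_ne.mpr hne] at hcd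
            have hall := ih.mp hrest
            rw [List.mem_cons] at hx hy
            have hx' : x ∈ d :: t' := by
              rcases hx with rfl | hx
              · exact hcd' ▸ List.mem_cons_self
              · exact hx
            have hy' : y ∈ d :: t' := by
              rcases hy with rfl | hy
              · exact hcd' ▸ List.mem_cons_self
              · exact hy
            exact hall x hx' y hy'
          · intro h
            have hcd : c = d := h c (by simp) d (by simp)
            simp only [List.contains_cons, Bool.or_eq_false_iff]
            refine ⟨by simp [hcd], ih.mpr ?_⟩
            intro x hx y hy
            exact h x (List.mem_cons_of_mem c hx) y (List.mem_cons_of_mem c hy)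

-- B's distinct-count condition says the same thing
theorem setLen_le_one_iff (l : List Char) :
    ((PySem.Set.ofList l).length ≤ 1) ↔ ∀ x ∈ l, ∀ y ∈ l, x = y := by
  constructor
  · intro h x hx y hy
    have hx' : x ∈ PySem.Set.ofList l := (PySem.Set.mem_ofList l x).mpr hx
    have hy' : y ∈ PySem.Set.ofList l := (PySem.Set.mem_ofList l y).mpr hy
    match hs : PySem.Set.ofList l with
    | [] => rw [hs] at hx'; simp at hx'
    | [a] =>
        rw [hs] at hx' hy'
        simp at hx' hy'
        rw [hx', hy']
    | a :: b :: r => rw [hs] at h; simp at h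
  · intro h
    match hs : PySem.Set.ofList l with
    | [] => simp
    | [a] => simp
    | a :: b :: r =>
        exfalso
        have hnd := PySem.Set.nodup_ofList (xs := l)
        rw [hs] at hnd
        have ha : a ∈ l := (PySem.Set.mem_ofList l a).mp (by rw [hs]; simp)
        have hb : b ∈ l := (PySem.Set.mem_ofList l b).mp (by rw [hs]; simp)
        have : a = b := h a ha b hb
        simp [this] at hnd

-- ===== VERDICT (by name: the statement is the Claim_ definition above) =====
theorem is_repdigit_spec : Claim_equal_is_repdigit := by
  intro num _
  unfold Spec_is_repdigit is_repdigit is_repdigit_alt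
  simp only []
  set l := (PySem.Int.toStr num).toList with hl
  by_cases h : (isRepdigitLoopA l 0 []).contains false = false
  · rw [if_neg (by rw [h]; simp)]
    exact (decide_eq_true ((setLen_le_one_iff l).mpr ((loopA_no_false_iff l).mp h))).symm
  · rw [if_pos (by simpa using h)]
    have hno : ¬ ((PySem.Set.ofList l).length ≤ 1) := by
      intro hle
      exact h ((loopA_no_false_iff l).mpr ((setLen_le_one_iff l).mp hle))
    exact (decide_eq_false hno).symm
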